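-- pv_equiv track=rewrite | github.com/AlexanderNoles/NEA | MazeGenerationNew.py | all_in_one_group
-- ===== SOURCE A (Python) =====
-- def all_in_one_group(wg_array,height,width):    #Checks to see if every cell is in a singular group (a.k.a every cell can be reached from any other cell)
--     returned = True
--     first_group = "null"
--     for x in range(0,width):
--         for y in range(0,height):
--             temp = (wg_array[x][y])[4]
--             if first_group == "null":
--                 first_group = temp
--             if temp != first_group or temp == 0:
--                 returned = False
--     return returned
-- ===== SOURCE B (Python) =====
-- def all_in_one_group(wg_array, height, width):
--     groups = {wg_array[x][y][4] for x in range(width) for y in range(height)}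
--     return len(groups) <= 1 and 0 not in groups
-- ===== Notes on version B (the rewrite author's own statement) =====
-- stated objective: simpler
-- what changed: Replaces the boolean-flag-plus-'null'-sentinel accumulation loop with gathering all group ids into a set comprehension and deciding uniformity and nonzero-ness in one final expression.
import Mathlib
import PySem

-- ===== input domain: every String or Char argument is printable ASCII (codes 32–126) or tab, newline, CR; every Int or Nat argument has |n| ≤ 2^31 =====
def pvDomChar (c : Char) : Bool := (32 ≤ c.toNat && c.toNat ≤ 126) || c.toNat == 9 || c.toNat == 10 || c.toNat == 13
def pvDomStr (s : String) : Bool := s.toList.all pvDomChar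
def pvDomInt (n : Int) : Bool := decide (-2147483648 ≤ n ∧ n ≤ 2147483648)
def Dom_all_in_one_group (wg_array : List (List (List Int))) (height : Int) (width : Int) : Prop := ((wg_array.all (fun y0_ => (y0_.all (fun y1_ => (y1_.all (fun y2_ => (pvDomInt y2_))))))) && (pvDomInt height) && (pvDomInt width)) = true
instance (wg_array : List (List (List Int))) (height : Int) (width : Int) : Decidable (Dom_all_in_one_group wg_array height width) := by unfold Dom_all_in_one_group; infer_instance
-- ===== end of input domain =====

-- B replaces A's flag + "null"-sentinel loop with a gathered set of group ids and one final decision; objective: simpler.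

-- ===== PORT A =====
-- Python's "null" string sentinel for first_group is ported as Option Int none.
-- Indexing wg_array[x][y][4] uses pyGetD; Pre_ guarantees every access is in range.
def all_in_one_group (wg_array : List (List (List Int))) (height : Int) (width : Int) : Bool :=
  ((PySem.List.pyRange 0 width 1).foldl (fun st x =>
      (PySem.List.pyRange 0 height 1).foldl (fun st y =>
        let temp := PySem.List.pyGetD (PySem.List.pyGetD (PySem.List.pyGetD wg_array x []) y []) 4 0
        let fg : Int := match st.2 with | none => temp | some g => g
        ((if temp ≠ fg ∨ temp = 0 then false else st.1), some fg)) st)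
    (true, (none : Option Int))).1

-- ===== PORT B =====
def all_in_one_group_alt (wg_array : List (List (List Int))) (height : Int) (width : Int) : Bool :=
  let groups : PySem.Set Int := PySem.Set.ofList
    ((PySem.List.pyRange 0 width 1).flatMap (fun x =>
      (PySem.List.pyRange 0 height 1).map (fun y =>
        PySem.List.pyGetD (PySem.List.pyGetD (PySem.List.pyGetD wg_array x []) y []) 4 0)))
  decide (PySem.Set.len groups ≤ 1) && !(PySem.Set.contains groups 0)

-- ===== PRECONDITION & SPEC =====
-- Pre_ excludes exactly the inputs where A raises IndexError: when both bounds are positive,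
-- every accessed row/cell must exist and each accessed cell must have length ≥ 5.
def Pre_all_in_one_group (wg_array : List (List (List Int))) (height : Int) (width : Int) : Prop :=
  0 < width → 0 < height →
    width.toNat ≤ wg_array.length ∧
    ∀ row ∈ wg_array.take width.toNat,
      height.toNat ≤ row.length ∧ ∀ cell ∈ row.take height.toNat, 5 ≤ cell.length
instance (wg_array : List (List (List Int))) (height : Int) (width : Int) : Decidable (Pre_all_in_one_group wg_array height width) := by unfold Pre_all_in_one_group; infer_instance
def pvWitness_all_in_one_group : List (List (List Int)) × Int × Int :=
  ([[[0,0,0,0,3],[0,0,0,0,3]],[[0,0,0,0,3],[0,0,0,0,3]]], 2, 2)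

def Spec_all_in_one_group (wg_array : List (List (List Int))) (height : Int) (width : Int) (out : Bool) : Prop := out = all_in_one_group_alt wg_array height width
instance (wg_array : List (List (List Int))) (height : Int) (width : Int) (out : Bool) : Decidable (Spec_all_in_one_group wg_array height width out) := by unfold Spec_all_in_one_group; infer_instance

-- ===== CLAIM (what is proved, stated in full; the proofs are below) =====
def Claim_equal_all_in_one_group : Prop := ∀ (wg_array : List (List (List Int))) (height : Int) (width : Int), Dom_all_in_one_group wg_array height width → Pre_all_in_one_group wg_array height width → Spec_all_in_one_group wg_array height width (all_in_one_group wg_array height width)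

-- ===== LEMMAS AND PROOFS =====

-- A's loop step on the flattened sequence of group ids.
def pvStep (st : Bool × Option Int) (t : Int) : Bool × Option Int :=
  let fg : Int := match st.2 with | none => t | some g => g
  ((if t ≠ fg ∨ t = 0 then false else st.1), some fg)

theorem foldl_nested_eq_flat {α β γ σ : Type} (xs : List α) (ys : List β) (f : α → β → γ)
    (step : σ → γ → σ) (init : σ) :
    xs.foldl (fun st x => ys.foldl (fun st y => step st (f x y)) st) init
      = (xs.flatMap (fun x => ys.map (f x))).foldl step init := by
  induction xs generalizing init with
  | nil => rfl
  | cons x xs ih => simp [List.flatMap_cons, List.foldl_append, List.foldl_map, ih]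

theorem foldl_pvStep_some (ts : List Int) (b : Bool) (g : Int) :
    (ts.foldl pvStep (b, some g)).1 = (b && ts.all (fun t => t == g && !(t == 0))) := by
  induction ts generalizing b with
  | nil => simp
  | cons t ts ih =>
    simp only [List.foldl_cons, pvStep, List.all_cons]
    rw [ih]
    by_cases h1 : t = g <;> by_cases h2 : t = 0 <;>
      cases b <;> simp [h1, h2, beq_eq_decide]

theorem ofList_all_eq (t : Int) (ts : List Int) (h : ∀ r ∈ ts, r = t) :
    PySem.Set.ofList (t :: ts) = [t] := by
  have : ∀ (ts : List Int), (∀ r ∈ ts, r = t) → ts.foldl PySem.Set.add [t] = [t] := by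
    intro ts h
    induction ts with
    | nil => rfl
    | cons r rs ih =>
      have hr : r = t := h r (by simp)
      simp only [List.foldl_cons, hr]
      rw [PySem.Set.add_of_mem (by simp)]
      exact ih (fun x hx => h x (by simp [hx]))
  rw [PySem.Set.ofList_eq_foldl]
  simp only [List.foldl_cons]
  rw [show PySem.Set.add [] t = [t] from rfl]
  exact this ts h

theorem two_mem_length (l : List Int) (a b : Int) (ha : a ∈ l) (hb : b ∈ l) (hab : a ≠ b) :
    ¬ l.length ≤ 1 := by
  match l with
  | [] => simp at ha
  | [x] =>
    simp at ha hb
    exact absurd (ha.trans hb.symm) hab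
  | x :: y :: rest => simp

-- core result on the flattened list of group ids
theorem flat_core (ts : List Int) :
    (ts.foldl pvStep (true, (none : Option Int))).1
      = (decide (PySem.Set.len (PySem.Set.ofList ts) ≤ 1) && !(PySem.Set.contains (PySem.Set.ofList ts) 0)) := by
  match ts with
  | [] => rfl
  | t :: rest =>
    simp only [List.foldl_cons]
    have hstep : pvStep (true, none) t = ((if t = 0 then false else true), some t) := by
      simp [pvStep]
    rw [hstep, foldl_pvStep_some]
    by_cases hall : ∀ r ∈ rest, r = t
    · rw [ofList_all_eq t rest hall]
      by_cases h0 : t = 0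
      · have hrest : rest.all (fun x => x == t && !(x == 0)) || true = true := by simp
        simp [PySem.Set.len, PySem.Set.contains, h0]
      · have hrest : rest.all (fun x => x == t && !(x == 0)) = true := by
          simp only [List.all_eq_true]
          intro r hr
          simp [hall r hr, h0]
        simp [PySem.Set.len, PySem.Set.contains, h0, hrest, Ne.symm h0]
    · push_neg at hall
      obtain ⟨r, hr, hrt⟩ := hall
      have hmemr : r ∈ PySem.Set.ofList (t :: rest) := by
        rw [PySem.Set.mem_ofList]; simp [hr]
      have hmemt : t ∈ PySem.Set.ofList (t :: rest) := by
        rw [PySem.Set.mem_ofList]; simp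
      have hlen := two_mem_length _ _ _ hmemr hmemt hrt
      have hrest : rest.all (fun x => x == t && !(x == 0)) = false := by
        simp only [List.all_eq_false]
        exact ⟨r, hr, by simp [hrt]⟩
      simp [hrest, PySem.Set.len, hlen]

theorem all_in_one_group_spec : Claim_equal_all_in_one_group := by
  intro wg_array height width _ _
  show all_in_one_group wg_array height width = all_in_one_group_alt wg_array height width
  exact (congrArg Prod.fst (foldl_nested_eq_flat
    (PySem.List.pyRange 0 width 1) (PySem.List.pyRange 0 height 1)
    (fun x y => PySem.List.pyGetD (PySem.List.pyGetD (PySem.List.pyGetD wg_array x []) y []) 4 0)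
    pvStep (true, none))).trans (flat_core _)
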